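-- pv_equiv track=rewrite | github.com/dongchen001/interview_question | 2.py | mark_brackets
-- ===== SOURCE A (Python) =====
-- def mark_brackets(input_lines):
--     results = []
--
--     for line in input_lines:
--         stack = []
--         output = list(line)
--         marker_output = [' ']*len(line)
--
--         for index, char in enumerate(line):
--             if char == '(':
--                 stack.append(index)  # Push the index of '('
--             elif char == ')':
--                 if stack:
--                     stack.pop()  # Pop the last unmatched '('
--                 else:
--                     # Mark a '?' below ')' if there is no matching '('
--                     marker_output[index] = '?'
--
--         # Place 'x' for each unmatched '(' in the stack
--         while stack:
--             left_index = stack.pop()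
--             if marker_output[left_index] == ' ':
--                 marker_output[left_index] = 'x'
--             else:
--                 # If there is already a '?' from a previous mismatch, add 'x' beside it
--                 marker_output[left_index] = 'x'
--
--         # Join everything to form the final strings
--         final_output = ''.join(output) + '\n' + ''.join(marker_output)
--         results.append(final_output)
--
--     return results
-- ===== SOURCE B (Python) =====
-- def mark_brackets(input_lines):
--     results = []
--     for line in input_lines:
--         marker = [' '] * len(line)
--         open_count = 0
--         for i, ch in enumerate(line):
--             if ch == '(':
--                 open_count += 1
--             elif ch == ')':
--                 if open_count > 0:
--                     open_count -= 1
--                 else: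
--                     marker[i] = '?'
--         close_count = 0
--         for i in range(len(line) - 1, -1, -1):
--             ch = line[i]
--             if ch == ')':
--                 close_count += 1
--             elif ch == '(':
--                 if close_count > 0:
--                     close_count -= 1
--                 else:
--                     marker[i] = 'x'
--         results.append(line + '\n' + ''.join(marker))
--     return results
-- ===== Notes on version B (the rewrite author's own statement) =====
-- stated objective: simpler
-- what changed: Replaces the index stack and post-loop while over leftover stack entries by two integer counters and two linear passes: a left-to-right pass marking '?' under unmatched ')' and a right-to-left pass marking 'x' under unmatched '(', with no stack at all.
import Mathlib
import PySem

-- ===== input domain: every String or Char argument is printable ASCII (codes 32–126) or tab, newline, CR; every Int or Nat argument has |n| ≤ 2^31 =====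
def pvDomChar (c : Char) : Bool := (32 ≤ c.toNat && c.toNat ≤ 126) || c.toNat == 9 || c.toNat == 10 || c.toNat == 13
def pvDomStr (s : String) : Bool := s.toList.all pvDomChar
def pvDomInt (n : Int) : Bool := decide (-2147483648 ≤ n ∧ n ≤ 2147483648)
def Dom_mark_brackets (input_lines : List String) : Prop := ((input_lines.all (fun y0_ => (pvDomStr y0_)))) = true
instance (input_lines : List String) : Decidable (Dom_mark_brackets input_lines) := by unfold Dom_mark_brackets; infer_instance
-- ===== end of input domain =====

-- B replaces A's index stack (and its leftover-stack while loop) by two integer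
-- counters and two linear passes (simpler: no stack, O(1) scalar state per line).

-- ===== PORT A =====
-- for index, char in enumerate(line): stack push/pop ('(' pushes index, ')' pops or marks '?')
def pvAFwd : List Char → Nat → List Nat → List Char → List Nat × List Char
  | [], _, stack, marker => (stack, marker)
  | char :: rest, index, stack, marker =>
    if char = '(' then pvAFwd rest (index + 1) (index :: stack) marker
    else if char = ')' then
      match stack with
      | [] => pvAFwd rest (index + 1) [] (marker.set index '?')
      | _ :: tl => pvAFwd rest (index + 1) tl marker
    else pvAFwd rest (index + 1) stack marker

-- while stack: pop and mark 'x' (A's if/else both write 'x'; kept literally)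
def pvAWhile : List Nat → List Char → List Char
  | [], marker => marker
  | left_index :: rest, marker =>
      pvAWhile rest
        (if marker.getD left_index ' ' = ' ' then marker.set left_index 'x'
         else marker.set left_index 'x')

def pvALine (line : String) : String :=
  String.ofList line.toList ++ "\n" ++
    String.ofList (pvAWhile (pvAFwd line.toList 0 [] (List.replicate line.toList.length ' ')).1
      (pvAFwd line.toList 0 [] (List.replicate line.toList.length ' ')).2)

def mark_brackets (input_lines : List String) : List String :=
  input_lines.map pvALine

-- ===== PORT B =====
-- left-to-right pass with an open-paren counter; unmatched ')' gets '?'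
def pvBFwd : List Char → Nat → Nat → List Char → Nat × List Char
  | [], _, open_count, marker => (open_count, marker)
  | ch :: rest, i, open_count, marker =>
    if ch = '(' then pvBFwd rest (i + 1) (open_count + 1) marker
    else if ch = ')' then
      if open_count > 0 then pvBFwd rest (i + 1) (open_count - 1) marker
      else pvBFwd rest (i + 1) open_count (marker.set i '?')
    else pvBFwd rest (i + 1) open_count marker

-- right-to-left pass (range(n-1,-1,-1)): recursion processes the suffix first,
-- then the char at index i — exactly the reverse iteration order
def pvBBack : List Char → Nat → Nat → List Char → Nat × List Char
  | [], _, close_count, marker => (close_count, marker)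
  | ch :: rest, i, close_count, marker =>
    let r := pvBBack rest (i + 1) close_count marker
    if ch = ')' then (r.1 + 1, r.2)
    else if ch = '(' then
      if r.1 > 0 then (r.1 - 1, r.2)
      else (r.1, r.2.set i 'x')
    else (r.1, r.2)

def pvBLine (line : String) : String :=
  line ++ "\n" ++
    String.ofList (pvBBack line.toList 0 0
      (pvBFwd line.toList 0 0 (List.replicate line.toList.length ' ')).2).2

def mark_brackets_alt (input_lines : List String) : List String :=
  input_lines.map pvBLine

-- ===== PRECONDITION & SPEC =====
def Spec_mark_brackets (input_lines : List String) (out : List String) : Prop := out = mark_brackets_alt input_lines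
instance (input_lines : List String) (out : List String) : Decidable (Spec_mark_brackets input_lines out) := by unfold Spec_mark_brackets; infer_instance

-- ===== CLAIM (what is proved, stated in full; the proofs are below) =====
def Claim_equal_mark_brackets : Prop := ∀ (input_lines : List String), Dom_mark_brackets input_lines → Spec_mark_brackets input_lines (mark_brackets input_lines)

-- ===== LEMMAS AND PROOFS =====

-- proof-side: A's stack evolution, ignoring the marker
def pvStk : List Char → Nat → List Nat → List Nat
  | [], _, st => st
  | c :: t, i, st =>
    if c = '(' then pvStk t (i + 1) (i :: st)
    else if c = ')' then pvStk t (i + 1) st.tail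
    else pvStk t (i + 1) st

-- unmatched-')' count of a segment (Nat subtraction floors at 0)
def pvU : List Char → Nat
  | [] => 0
  | c :: t => if c = ')' then pvU t + 1 else if c = '(' then pvU t - 1 else pvU t

-- absolute positions of unmatched '(' (deepest-first = pop order of A's stack)
def pvX : List Char → Nat → List Nat
  | [], _ => []
  | c :: t, i => pvX t (i + 1) ++ (if c = '(' ∧ pvU t = 0 then [i] else [])

def pvSetAll (l : List Nat) (m : List Char) : List Char :=
  l.foldl (fun m j => m.set j 'x') m

-- A's forward loop = B's forward loop, with open_count = stack length
theorem pvFwd_sync : ∀ (cs : List Char) (i : Nat) (st : List Nat) (m : List Char),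
    pvBFwd cs i st.length m = ((pvAFwd cs i st m).1.length, (pvAFwd cs i st m).2) := by
  intro cs
  induction cs with
  | nil => intro i st m; rfl
  | cons c t ih =>
    intro i st m
    by_cases h1 : c = '('
    · simp [pvAFwd, pvBFwd, h1]
      exact ih (i + 1) (i :: st) m
    · by_cases h2 : c = ')'
      · cases st with
        | nil => simp [pvAFwd, pvBFwd, h1, h2]; exact ih (i + 1) [] (m.set i '?')
        | cons s0 tl =>
          simp [pvAFwd, pvBFwd, h1, h2]
          exact ih (i + 1) tl m
      · simp [pvAFwd, pvBFwd, h1, h2]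
        exact ih (i + 1) st m

-- A's stack component is pvStk
theorem pvAFwd_fst : ∀ (cs : List Char) (i : Nat) (st : List Nat) (m : List Char),
    (pvAFwd cs i st m).1 = pvStk cs i st := by
  intro cs
  induction cs with
  | nil => intro i st m; rfl
  | cons c t ih =>
    intro i st m
    by_cases h1 : c = '('
    · simp [pvAFwd, pvStk, h1]; exact ih _ _ _
    · by_cases h2 : c = ')'
      · cases st with
        | nil => simp [pvAFwd, pvStk, h1, h2]; exact ih _ _ _
        | cons s0 tl => simp [pvAFwd, pvStk, h1, h2]; exact ih _ _ _
      · simp [pvAFwd, pvStk, h1, h2]; exact ih _ _ _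

theorem pvStk_append : ∀ (cs : List Char) (i : Nat) (st : List Nat),
    pvStk cs i st = pvStk cs i [] ++ st.drop (pvU cs) := by
  intro cs
  induction cs with
  | nil => intro i st; simp [pvStk, pvU]
  | cons c t ih =>
    intro i st
    by_cases h1 : c = '('
    · simp only [pvStk, pvU, h1, if_pos rfl, if_true]
      rw [ih (i + 1) (i :: st), ih (i + 1) [i]]
      simp only [List.append_assoc]
      congr 1
      cases h : pvU t with
      | zero => simp [h]
      | succ k => simp [h]
    · by_cases h2 : c = ')'
      · simp only [pvStk, pvU, h2, if_neg h1, if_pos rfl, List.tail_nil]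
        rw [ih (i + 1) st.tail, List.drop_tail]
        simp
      · simp only [pvStk, pvU, h1, h2, if_neg h1, if_neg h2]
        exact ih (i + 1) st
  
theorem pvStk_eq_pvX : ∀ (cs : List Char) (i : Nat),
    pvStk cs i [] = pvX cs i := by
  intro cs
  induction cs with
  | nil => intro i; rfl
  | cons c t ih =>
    intro i
    by_cases h1 : c = '('
    · simp only [pvStk, pvX, h1, if_pos rfl]
      rw [pvStk_append t (i + 1) [i], ih (i + 1)]
      congr 1
      cases h : pvU t with
      | zero => simp [h]
      | succ k => simp [h]
    · by_cases h2 : c = ')'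
      · simp only [pvStk, pvX, h1, h2, if_neg h1, if_pos rfl, List.tail_nil]
        rw [ih (i + 1)]
        simp [h1]
      · simp only [pvStk, pvX, h1, h2, if_neg h1, if_neg h2]
        rw [ih (i + 1)]
        simp [h1]

-- B's backward pass = mark 'x' at pvX positions (foldl order), counter ends at pvU
theorem pvBBack_eq : ∀ (cs : List Char) (i : Nat) (m : List Char),
    pvBBack cs i 0 m = (pvU cs, pvSetAll (pvX cs i) m) := by
  intro cs
  induction cs with
  | nil => intro i m; rfl
  | cons c t ih =>
    intro i m
    by_cases h1 : c = ')'
    · simp only [pvBBack, pvU, pvX, h1, if_pos rfl]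
      rw [ih (i + 1) m]
      simp [h1, pvSetAll]
    · by_cases h2 : c = '('
      · simp only [pvBBack, pvU, pvX, h1, h2, if_neg h1, if_pos rfl]
        rw [ih (i + 1) m]
        cases h : pvU t with
        | zero => simp [h, h2, pvSetAll]
        | succ k => simp [h, h2, pvSetAll]
      · simp only [pvBBack, pvU, pvX, h1, h2, if_neg h1, if_neg h2]
        rw [ih (i + 1) m]
        simp [h2, pvSetAll]

-- A's while loop = mark 'x' at the stack's positions, in pop (list) order
theorem pvAWhile_eq : ∀ (st : List Nat) (m : List Char),
    pvAWhile st m = pvSetAll st m := by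
  intro st
  induction st with
  | nil => intro m; rfl
  | cons j rest ih =>
    intro m
    simp only [pvAWhile, ite_self, pvSetAll, List.foldl_cons]
    exact ih (m.set j 'x')

theorem pvFwd_sync0 (cs : List Char) (i : Nat) (m : List Char) :
    pvBFwd cs i 0 m = ((pvAFwd cs i [] m).1.length, (pvAFwd cs i [] m).2) :=
  pvFwd_sync cs i [] m

theorem pvLine_eq (line : String) : pvALine line = pvBLine line := by
  unfold pvALine pvBLine
  rw [pvFwd_sync0, pvBBack_eq, pvAWhile_eq, pvAFwd_fst, pvStk_eq_pvX]
  simp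

-- ===== VERDICT (by name: the statement is the Claim_ definition above) =====
theorem mark_brackets_spec : Claim_equal_mark_brackets := by
  intro input_lines _
  unfold Spec_mark_brackets mark_brackets mark_brackets_alt
  simp [pvLine_eq]
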